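-- pv_equiv track=rewrite | github.com/qcianna/Graphs | zestaw4/main.py | di_adjacency_matrix_to_incidence_matrix
-- ===== SOURCE A (Python) =====
-- def di_adjacency_matrix_to_incidence_matrix(matrix):
--     number_of_edges = sum(1 if matrix[i][j] == 1 else 0 for i in range(len(matrix)) for j in range(len(matrix)))
--     incidence_matrix = [[0 for i in range(number_of_edges)] for j in range(len(matrix))]
--
--     current_edge = 0
--     for i in range(len(matrix)):
--         for j in range(len(matrix)):
--             if matrix[i][j] == 1:
--                 incidence_matrix[i][current_edge] = -1
--                 incidence_matrix[j][current_edge] = 1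
--                 current_edge += 1
--
--     return incidence_matrix
-- ===== SOURCE B (Python) =====
-- def di_adjacency_matrix_to_incidence_matrix(matrix):
--     n = len(matrix)
--     edges = [(i, j) for i in range(n) for j in range(n) if matrix[i][j] == 1]
--     return [[1 if v == j else -1 if v == i else 0 for (i, j) in edges]
--             for v in range(n)]
-- ===== Notes on version B (the rewrite author's own statement) =====
-- stated objective: simpler
-- what changed: A allocates a zero matrix and scatter-mutates two cells per edge while carrying a running edge counter over a second full matrix scan; B builds the row-major edge list once and constructs every row purely, computing each cell by the closed formula (1 if v==j else -1 if v==i else 0), with no mutation and no counter.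
import Mathlib
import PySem

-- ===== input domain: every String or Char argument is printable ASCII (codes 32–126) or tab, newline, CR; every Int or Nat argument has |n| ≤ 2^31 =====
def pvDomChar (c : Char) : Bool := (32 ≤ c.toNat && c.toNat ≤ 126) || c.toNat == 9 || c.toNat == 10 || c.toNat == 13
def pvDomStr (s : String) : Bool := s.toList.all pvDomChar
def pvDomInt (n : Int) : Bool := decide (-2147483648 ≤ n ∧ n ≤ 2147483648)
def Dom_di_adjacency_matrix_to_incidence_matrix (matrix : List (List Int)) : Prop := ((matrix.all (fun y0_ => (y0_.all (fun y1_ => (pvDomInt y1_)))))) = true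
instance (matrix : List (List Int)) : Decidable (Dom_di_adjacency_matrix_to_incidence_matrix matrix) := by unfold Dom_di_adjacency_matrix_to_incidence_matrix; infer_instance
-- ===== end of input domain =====

-- B replaces A's allocate-then-scatter-mutate scheme (zero matrix, two cell writes per edge,
-- a running edge counter) with a pure construction: build the row-major edge list once, then
-- compute every row cell-by-cell with a closed formula (simpler; return values proved equal on Pre_).

-- ===== PORT A =====
-- matrix[i][j] for i,j drawn from range(len(matrix)): nonnegative in-range indices under Pre_,
-- so plain getD is exact there
def pvEntry (matrix : List (List Int)) (i j : Nat) : Int :=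
  (matrix.getD i []).getD j 0

-- incidence_matrix[i][c] = v (i < n and c < numberOfEdges always hold under Pre_, so List.set is exact)
def pvSetEntry (m : List (List Int)) (i c : Nat) (v : Int) : List (List Int) :=
  m.set i ((m.getD i []).set c v)

-- the row-major (i, j) pairs of the two nested 'for … in range(len(matrix))' loops
def pvPairs (n : Nat) : List (Nat × Nat) :=
  (List.range n).flatMap (fun i => (List.range n).map (fun j => (i, j)))

def di_adjacency_matrix_to_incidence_matrix (matrix : List (List Int)) : List (List Int) :=
  let n := matrix.length
  let numberOfEdges :=
    (pvPairs n).foldl (fun acc p => acc + (if pvEntry matrix p.1 p.2 = 1 then 1 else 0)) 0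
  let init := List.replicate n (List.replicate numberOfEdges (0 : Int))
  ((pvPairs n).foldl
    (fun (st : List (List Int) × Nat) p =>
      if pvEntry matrix p.1 p.2 = 1 then
        (pvSetEntry (pvSetEntry st.1 p.1 st.2 (-1)) p.2 st.2 1, st.2 + 1)
      else st)
    (init, 0)).1

-- ===== PORT B =====
-- '1 if v == j else -1 if v == i else 0'
def pvCell (v : Nat) (p : Nat × Nat) : Int :=
  if v = p.2 then 1 else if v = p.1 then -1 else 0

def di_adjacency_matrix_to_incidence_matrix_alt (matrix : List (List Int)) : List (List Int) :=
  let n := matrix.length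
  let edges := (pvPairs n).filter (fun p => pvEntry matrix p.1 p.2 = 1)
  (List.range n).map (fun v => edges.map (fun p => pvCell v p))

-- ===== PRECONDITION & SPEC =====
-- Pre_ excludes exactly the inputs where Python A raises IndexError: some row shorter than len(matrix)
def Pre_di_adjacency_matrix_to_incidence_matrix (matrix : List (List Int)) : Prop :=
  ∀ r ∈ matrix, matrix.length ≤ r.length
instance (matrix : List (List Int)) : Decidable (Pre_di_adjacency_matrix_to_incidence_matrix matrix) := by unfold Pre_di_adjacency_matrix_to_incidence_matrix; infer_instance

def pvWitness_di_adjacency_matrix_to_incidence_matrix : List (List Int) := [[0, 1], [1, 0]]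

def Spec_di_adjacency_matrix_to_incidence_matrix (matrix : List (List Int)) (out : List (List Int)) : Prop := out = di_adjacency_matrix_to_incidence_matrix_alt matrix
instance (matrix : List (List Int)) (out : List (List Int)) : Decidable (Spec_di_adjacency_matrix_to_incidence_matrix matrix out) := by unfold Spec_di_adjacency_matrix_to_incidence_matrix; infer_instance

-- ===== CLAIM (what is proved, stated in full; the proofs are below) =====
def Claim_equal_di_adjacency_matrix_to_incidence_matrix : Prop := ∀ (matrix : List (List Int)), Dom_di_adjacency_matrix_to_incidence_matrix matrix → Pre_di_adjacency_matrix_to_incidence_matrix matrix → Spec_di_adjacency_matrix_to_incidence_matrix matrix (di_adjacency_matrix_to_incidence_matrix matrix)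

-- ===== LEMMAS AND PROOFS =====

-- A's counting pass computes the length of B's edge list
theorem pv_count_eq_filter_length (matrix : List (List Int)) (ps : List (Nat × Nat)) (a : Nat) :
    ps.foldl (fun acc p => acc + (if pvEntry matrix p.1 p.2 = 1 then 1 else 0)) a
      = a + (ps.filter (fun p => pvEntry matrix p.1 p.2 = 1)).length := by
  induction ps generalizing a with
  | nil => simp
  | cons p ps ih =>
    simp only [List.foldl_cons, List.filter_cons]
    by_cases h : pvEntry matrix p.1 p.2 = 1 <;> simp [h, ih] <;> omega

-- A's guarded fold over all pairs equals the unguarded fold over the filtered pairs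
theorem pv_fold_filter (matrix : List (List Int)) (ps : List (Nat × Nat))
    (st : List (List Int) × Nat) :
    ps.foldl
      (fun (st : List (List Int) × Nat) p =>
        if pvEntry matrix p.1 p.2 = 1 then
          (pvSetEntry (pvSetEntry st.1 p.1 st.2 (-1)) p.2 st.2 1, st.2 + 1)
        else st) st
    = (ps.filter (fun p => pvEntry matrix p.1 p.2 = 1)).foldl
        (fun (st : List (List Int) × Nat) p =>
          (pvSetEntry (pvSetEntry st.1 p.1 st.2 (-1)) p.2 st.2 1, st.2 + 1)) st := by
  induction ps generalizing st with
  | nil => rfl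
  | cons p ps ih =>
    simp only [List.foldl_cons, List.filter_cons]
    by_cases h : pvEntry matrix p.1 p.2 = 1 <;> simp [h, ih]

theorem pvPairs_mem {n : Nat} {p : Nat × Nat} (h : p ∈ pvPairs n) : p.1 < n ∧ p.2 < n := by
  simp only [pvPairs, List.mem_flatMap, List.mem_map, List.mem_range] at h
  obtain ⟨i, hi, j, hj, rfl⟩ := h
  exact ⟨hi, hj⟩

theorem pvSetEntry_length (m : List (List Int)) (i c : Nat) (v : Int) :
    (pvSetEntry m i c v).length = m.length := by
  simp [pvSetEntry]

-- reading row v after a set of row i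
theorem pvSetEntry_getD (m : List (List Int)) (i c : Nat) (x : Int) (v : Nat)
    (hi : i < m.length) :
    (pvSetEntry m i c x).getD v [] =
      if v = i then (m.getD i []).set c x else m.getD v [] := by
  unfold pvSetEntry
  rcases eq_or_ne v i with h | h
  · subst h
    simp [List.getD, List.getElem?_set, hi]
  · have h' : i ≠ v := h.symm
    simp [List.getD, List.getElem?_set, h', h]

-- the scatter fold acts on each row independently
theorem pv_fold_row (matrix : List (List Int)) (es : List (Nat × Nat))
    (m : List (List Int)) (c : Nat) (v : Nat)
    (hb : ∀ p ∈ es, p.1 < m.length ∧ p.2 < m.length) :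
    ((es.foldl
        (fun (st : List (List Int) × Nat) p =>
          (pvSetEntry (pvSetEntry st.1 p.1 st.2 (-1)) p.2 st.2 1, st.2 + 1)) (m, c)).1).getD v []
    = (es.foldl
        (fun (rc : List Int × Nat) p =>
          (if v = p.2 then rc.1.set rc.2 1
           else if v = p.1 then rc.1.set rc.2 (-1) else rc.1, rc.2 + 1))
        (m.getD v [], c)).1 := by
  induction es generalizing m c with
  | nil => rfl
  | cons p es ih =>
    obtain ⟨h1, h2⟩ := hb p (List.mem_cons_self ..)
    have h2' : p.2 < (pvSetEntry m p.1 c (-1)).length := by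
      rw [pvSetEntry_length]; exact h2
    simp only [List.foldl_cons]
    rw [ih _ _ (by
          intro q hq
          have := hb q (List.mem_cons_of_mem _ hq)
          simpa [pvSetEntry_length] using this)]
    have hstart : (pvSetEntry (pvSetEntry m p.1 c (-1)) p.2 c 1).getD v []
        = if v = p.2 then (m.getD v []).set c 1
          else if v = p.1 then (m.getD v []).set c (-1) else m.getD v [] := by
      simp only [pvSetEntry_getD _ _ _ _ _ h2', pvSetEntry_getD _ _ _ _ _ h1]
      rcases eq_or_ne v p.2 with e2 | e2
      · subst e2
        rcases eq_or_ne p.2 p.1 with e1 | e1 <;> simp [e1, List.set_set]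
      · rcases eq_or_ne v p.1 with e1 | e1
        · subst e1
          simp [e2, Ne.symm e2]
        · simp [e2, e1]
    rw [hstart]

-- writing at the end of the filled prefix
theorem pv_set_at_len (pre : List Int) (y x : Int) (rest : List Int) :
    (pre ++ y :: rest).set pre.length x = pre ++ x :: rest := by
  induction pre with
  | nil => rfl
  | cons a pre ih => simpa using ih

-- the per-row fold from a zero suffix produces the mapped cells
theorem pv_row_fold (v : Nat) (es : List (Nat × Nat)) (pre : List Int) :
    (es.foldl
        (fun (rc : List Int × Nat) p =>
          (if v = p.2 then rc.1.set rc.2 1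
           else if v = p.1 then rc.1.set rc.2 (-1) else rc.1, rc.2 + 1))
        (pre ++ List.replicate es.length 0, pre.length)).1
    = pre ++ es.map (fun p => pvCell v p) := by
  induction es generalizing pre with
  | nil => simp
  | cons p es ih =>
    simp only [List.foldl_cons, List.length_cons, List.replicate_succ, List.map_cons]
    have hrow : (if v = p.2 then (pre ++ (0 : Int) :: List.replicate es.length 0).set pre.length 1
          else if v = p.1 then
            (pre ++ (0 : Int) :: List.replicate es.length 0).set pre.length (-1)
          else pre ++ (0 : Int) :: List.replicate es.length 0)
        = (pre ++ [pvCell v p]) ++ List.replicate es.length 0 := by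
      unfold pvCell
      split_ifs <;> simp [pv_set_at_len]
    rw [hrow, show pre.length + 1 = (pre ++ [pvCell v p]).length by simp, ih]
    simp

theorem pv_fold_length (es : List (Nat × Nat)) (m : List (List Int)) (c : Nat) :
    ((es.foldl
        (fun (st : List (List Int) × Nat) p =>
          (pvSetEntry (pvSetEntry st.1 p.1 st.2 (-1)) p.2 st.2 1, st.2 + 1)) (m, c)).1).length
      = m.length := by
  induction es generalizing m c with
  | nil => rfl
  | cons p es ih => simp only [List.foldl_cons]; rw [ih]; simp [pvSetEntry_length]

-- ===== VERDICT (by name: the statement is the Claim_ definition above) =====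
theorem di_adjacency_matrix_to_incidence_matrix_spec : Claim_equal_di_adjacency_matrix_to_incidence_matrix := by
  intro matrix _ _
  unfold Spec_di_adjacency_matrix_to_incidence_matrix
  unfold di_adjacency_matrix_to_incidence_matrix di_adjacency_matrix_to_incidence_matrix_alt
  simp only
  set n := matrix.length with hn
  set es := (pvPairs n).filter (fun p => pvEntry matrix p.1 p.2 = 1) with hes
  rw [pv_count_eq_filter_length, pv_fold_filter]
  simp only [Nat.zero_add]
  have hb : ∀ p ∈ es, p.1 < (List.replicate n (List.replicate es.length (0 : Int))).length
      ∧ p.2 < (List.replicate n (List.replicate es.length (0 : Int))).length := by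
    intro p hp
    have := pvPairs_mem (List.mem_of_mem_filter hp)
    simpa using this
  apply List.ext_getElem
  · rw [pv_fold_length]; simp
  · intro v hv _
    have hv' : v < n := by rwa [pv_fold_length, List.length_replicate] at hv
    have hrow := pv_fold_row matrix es (List.replicate n (List.replicate es.length (0 : Int))) 0 v hb
    have hinit : (List.replicate n (List.replicate es.length (0 : Int))).getD v []
        = List.replicate es.length (0 : Int) := by
      simp [List.getD, List.getElem?_replicate, hv']
    rw [hinit] at hrow
    have hrow2 := pv_row_fold v es []
    simp only [List.nil_append, List.length_nil] at hrow2
    have hget : ∀ (l : List (List Int)) (h : v < l.length), l[v] = l.getD v [] := by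
      intro l h; simp [List.getD, List.getElem?_eq_getElem h]
    rw [hget _ hv, hrow, hrow2]
    simp [List.getElem_map, List.getElem_range, hv']
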